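-- pv_equiv track=rewrite | github.com/ishaankulshrestha/pythonBaseProjects | com/ishaan/python/general/StringCompression.py | getcomplength
-- ===== SOURCE A (Python) =====
-- def getcomplength(str1):
--     i=0
--     length = 0
--     while i < len(str1):
--         while i+1 < len(str1) and str1[i] == str1[i+1] :
--             i += 1
--         length += 2
--         i+=1
--     return length
-- ===== SOURCE B (Python) =====
-- def getcomplength(str1):
--     if not str1:
--         return 0
--     return 2 * (1 + sum(1 for a, b in zip(str1, str1[1:]) if a != b))
-- ===== Notes on version B (the rewrite author's own statement) =====
-- stated objective: idiomatic
-- what changed: Replaced the nested while-loops with index bookkeeping by a single flat zip pass counting adjacent-character boundaries; answer is 2*(boundaries+1) for non-empty input.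
import Mathlib
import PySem

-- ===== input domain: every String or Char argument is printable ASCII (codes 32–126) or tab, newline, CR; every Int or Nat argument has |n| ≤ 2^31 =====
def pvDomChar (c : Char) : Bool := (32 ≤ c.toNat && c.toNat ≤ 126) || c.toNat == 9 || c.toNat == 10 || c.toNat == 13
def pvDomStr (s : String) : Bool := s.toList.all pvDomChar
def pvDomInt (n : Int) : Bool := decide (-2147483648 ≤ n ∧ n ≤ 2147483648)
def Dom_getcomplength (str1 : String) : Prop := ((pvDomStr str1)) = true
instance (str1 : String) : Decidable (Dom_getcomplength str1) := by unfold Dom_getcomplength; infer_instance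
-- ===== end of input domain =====

-- B replaces A's nested while-loops and index bookkeeping by one flat zip pass
-- counting adjacent-character boundaries (idiomatic; same cost).

-- ===== PORT A =====
-- inner while: starting at the head of a run (prev char c, remaining suffix t),
-- advance i through the run and then one past it; the state is the unconsumed suffix.
def pvDropRun : Char → List Char → List Char
  | _, [] => []
  | c, d :: t => if c = d then pvDropRun d t else d :: t

theorem pvDropRun_length_le (c : Char) (t : List Char) :
    (pvDropRun c t).length ≤ t.length := by
  induction t generalizing c with
  | nil => simp [pvDropRun]
  | cons d t ih =>
    simp only [pvDropRun]
    split
    · exact le_trans (ih d) (Nat.le_succ _)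
    · simp

-- outer while: state = unconsumed suffix and the accumulator `length`
def pvLoopA : List Char → Nat → Nat
  | [], len => len
  | c :: t, len => pvLoopA (pvDropRun c t) (len + 2)
termination_by s _ => s.length
decreasing_by
  exact Nat.lt_succ_of_le (pvDropRun_length_le c t)

def getcomplength (str1 : String) : Int := (pvLoopA str1.toList 0 : Int)

-- ===== PORT B =====
def pvBd (s : List Char) : Nat := (s.zip s.tail).countP (fun p => decide (p.1 ≠ p.2))

def getcomplength_alt (str1 : String) : Int :=
  let s := str1.toList
  if s.isEmpty then 0 else 2 * (1 + (pvBd s : Int))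

-- ===== PRECONDITION & SPEC =====
def Spec_getcomplength (str1 : String) (out : Int) : Prop := out = getcomplength_alt str1
instance (str1 : String) (out : Int) : Decidable (Spec_getcomplength str1 out) := by unfold Spec_getcomplength; infer_instance

-- ===== CLAIM (what is proved, stated in full; the proofs are below) =====
def Claim_equal_getcomplength : Prop := ∀ (str1 : String), Dom_getcomplength str1 → Spec_getcomplength str1 (getcomplength str1)

-- ===== LEMMAS AND PROOFS =====
theorem pvBd_cons_cons (c d : Char) (t : List Char) :
    pvBd (c :: d :: t) = (if c = d then 0 else 1) + pvBd (d :: t) := by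
  simp only [pvBd, List.tail, List.zip_cons_cons, List.countP_cons]
  by_cases h : c = d
  · simp [h]
  · simp [h]; omega

theorem pvLoopA_eq (t : List Char) : ∀ (c : Char) (len : Nat),
    pvLoopA (c :: t) len = len + 2 + 2 * pvBd (c :: t) := by
  induction t with
  | nil =>
    intro c len
    simp [pvLoopA, pvDropRun, pvBd]
  | cons d t ih =>
    intro c len
    rw [pvLoopA]
    by_cases h : c = d
    · have : pvDropRun c (d :: t) = pvDropRun d t := by simp [pvDropRun, h]
      rw [this]
      have h2 : pvLoopA (pvDropRun d t) (len + 2) = pvLoopA (d :: t) len := by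
        rw [pvLoopA]
      rw [h2, ih d len, pvBd_cons_cons, if_pos h]
      ring
    · have : pvDropRun c (d :: t) = d :: t := by simp [pvDropRun, h]
      rw [this, ih d (len + 2), pvBd_cons_cons, if_neg h]
      ring

theorem getcomplength_spec : Claim_equal_getcomplength := by
  intro str1 _
  unfold Spec_getcomplength getcomplength getcomplength_alt
  cases hs : str1.toList with
  | nil => simp [pvLoopA]
  | cons c t =>
    rw [pvLoopA_eq t c 0]
    push_cast
    simp
    ring
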